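-- pv_equiv track=rewrite | github.com/syscrsh/dev0-keygen | keygen.py | gen_username_value
-- ===== SOURCE A (Python) =====
-- def gen_username_value(username):
--     xor_key = 0x0185
--
--     username_bytes = bytearray()
--     username_bytes.extend(map(ord, username))
--
--     ret = 0
--     for idx,byte in enumerate(username_bytes):
--         if idx % 2 != 0:
--             byte += 0x100
--         ret += byte ^ xor_key
--     return ret
-- ===== SOURCE B (Python) =====
-- def gen_username_value(username):
--     xor_key = 0x0185
--
--     username_bytes = bytearray()
--     username_bytes.extend(map(ord, username))
--
--     total = sum(b ^ xor_key for b in username_bytes)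
--     # odd-index bytes had bit 8 added before XOR with a key that sets bit 8,
--     # which lowers each such term by exactly 0x100
--     return total - 0x100 * (len(username_bytes) // 2)
-- ===== Notes on version B (the rewrite author's own statement) =====
-- stated objective: simpler
-- what changed: Replaces the enumerate/parity branch with a plain sum of b ^ 0x185 plus a closed-form correction -0x100*(len//2) (one branch-free pass), using that adding 0x100 before XOR with a key whose bit 8 is set lowers each odd-index term by exactly 0x100.
import Mathlib
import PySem

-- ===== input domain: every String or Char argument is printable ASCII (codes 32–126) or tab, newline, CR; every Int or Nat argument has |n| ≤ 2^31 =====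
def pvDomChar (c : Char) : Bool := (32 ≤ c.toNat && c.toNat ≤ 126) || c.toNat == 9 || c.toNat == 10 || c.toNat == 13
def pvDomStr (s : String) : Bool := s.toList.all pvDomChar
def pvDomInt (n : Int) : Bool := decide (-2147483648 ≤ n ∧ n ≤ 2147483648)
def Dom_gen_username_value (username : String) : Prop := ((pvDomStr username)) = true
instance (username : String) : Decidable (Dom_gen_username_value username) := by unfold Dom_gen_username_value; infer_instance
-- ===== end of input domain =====

-- B replaces A's enumerate/parity branch by a plain XOR-sum with a closed-form
-- correction -0x100*(len//2); objective: simpler.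

-- ===== PORT A =====
def gen_username_value (username : String) : Int :=
  let username_bytes : List Int := username.toList.map (fun c => (c.toNat : Int))
  (PySem.List.enumerate username_bytes 0).foldl
    (fun ret p =>
      let byte := if PySem.Int.mod p.1 2 ≠ 0 then p.2 + 0x100 else p.2
      ret + PySem.Int.bxor byte 0x0185) 0

-- ===== PORT B =====
def gen_username_value_alt (username : String) : Int :=
  let username_bytes : List Int := username.toList.map (fun c => (c.toNat : Int))
  let total := (username_bytes.map (fun b => PySem.Int.bxor b 0x0185)).sum
  total - 0x100 * PySem.Int.floordiv (username_bytes.length : Int) 2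

-- ===== PRECONDITION & SPEC =====
def Spec_gen_username_value (username : String) (out : Int) : Prop := out = gen_username_value_alt username
instance (username : String) (out : Int) : Decidable (Spec_gen_username_value username out) := by unfold Spec_gen_username_value; infer_instance

-- ===== CLAIM (what is proved, stated in full; the proofs are below) =====
def Claim_equal_gen_username_value : Prop := ∀ (username : String), Dom_gen_username_value username → Spec_gen_username_value username (gen_username_value username)

-- ===== LEMMAS AND PROOFS =====

-- bit-8 algebra on Nat, checked exhaustively
lemma nat_xor_shift : ∀ n : Nat, n < 127 → ((n + 256) ^^^ 389) + 256 = n ^^^ 389 := by decide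

lemma bxor_shift (b : Int) (h0 : 0 ≤ b) (h1 : b ≤ 126) :
    PySem.Int.bxor (b + 256) 389 = PySem.Int.bxor b 389 - 256 := by
  lift b to Nat using h0
  have hb : b < 127 := by omega
  have h389 : (389 : Int) = ((389 : Nat) : Int) := rfl
  have h256 : (b : Int) + 256 = ((b + 256 : Nat) : Int) := by push_cast; ring
  rw [h256, h389, PySem.Int.bxor_natCast, PySem.Int.bxor_natCast]
  have := nat_xor_shift b hb
  omega

-- A's loop over enumerate, with an arbitrary starting index and accumulator
lemma loopA (l : List Int) (i : Nat) (acc : Int)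
    (h : ∀ b ∈ l, 0 ≤ b ∧ b ≤ 126) :
    (PySem.List.enumerate l (i : Int)).foldl
      (fun ret p =>
        let byte := if PySem.Int.mod p.1 2 ≠ 0 then p.2 + 0x100 else p.2
        ret + PySem.Int.bxor byte 0x0185) acc
    = acc + (l.map (fun b => PySem.Int.bxor b 0x0185)).sum
        - 256 * ((((i + l.length) / 2 : Nat) : Int) - ((i / 2 : Nat) : Int)) := by
  induction l generalizing i acc with
  | nil => simp [PySem.List.enumerate_nil]
  | cons b l ih =>
    have hb := h b (List.mem_cons_self ..)
    have hl : ∀ x ∈ l, 0 ≤ x ∧ x ≤ 126 := fun x hx => h x (List.mem_cons_of_mem _ hx)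
    rw [PySem.List.enumerate_cons]
    simp only [List.foldl_cons]
    have hstep : ((i : Int) + 1) = ((i + 1 : Nat) : Int) := by push_cast; ring
    rw [hstep, ih (i + 1) _ hl]
    have hmod : PySem.Int.mod (i : Int) 2 = ((i % 2 : Nat) : Int) := by
      exact_mod_cast PySem.Int.mod_natCast i 2
    by_cases hp : i % 2 = 0
    · simp only [hmod, hp, List.map_cons, List.sum_cons]
      norm_num
      omega
    · have hp1 : i % 2 = 1 := by omega
      simp only [hmod, hp1, List.map_cons, List.sum_cons]
      norm_num
      rw [bxor_shift b hb.1 hb.2]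
      omega

-- ===== VERDICT (by name: the statement is the Claim_ definition above) =====
theorem gen_username_value_spec : Claim_equal_gen_username_value := by
  intro username hdom
  unfold Spec_gen_username_value gen_username_value gen_username_value_alt
  have hbound : ∀ b ∈ username.toList.map (fun c => ((c.toNat : Int))), 0 ≤ b ∧ b ≤ 126 := by
    intro b hb
    rcases List.mem_map.1 hb with ⟨c, hc, rfl⟩
    have := List.all_eq_true.1 hdom c hc
    simp [pvDomChar] at this
    omega
  have hloop := loopA _ 0 0 hbound
  simp only [Nat.cast_zero, zero_add, Nat.zero_div, sub_zero] at hloop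
  rw [hloop]
  have hfd : PySem.Int.floordiv (((username.toList.map (fun c => ((c.toNat : Int)))).length : Nat) : Int) 2
      = (((username.toList.map (fun c => ((c.toNat : Int)))).length / 2 : Nat) : Int) :=
    PySem.Int.floordiv_natCast _ 2
  simp only [List.length_map] at *
  rw [hfd]
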